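-- pv_equiv track=rewrite | github.com/mylesfabre/stop-eating-animals | hw2pr3.py | symPlace
-- ===== SOURCE A (Python) =====
-- def symPlace(S1, S2):
--     '''takes in the two strings and sees if the first two elements
--     match, if they do, we map the match function which compares elements
--     and if the elements don't match, we map an # symbol into the element's
--     slot in each list'''
--     if S1[0]==S2[0]:
--         mapList = list(map(match, S1, S2))
--         return mapList
--     else:
--         option1 = symPlace(S1, S2[1:])
--         option2 = symPlace(S1[1:], S2)
--         return max(option1, option2)
--
-- def match(ele1, ele2):
--     '''checks to see if the elements match, and if not, returns a # symbol'''
--     if ele1 == ele2: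
--         return ele1
--     else:
--         ele2 = "#"
--         return ele2
-- ===== SOURCE B (Python) =====
-- def symPlace(S1, S2):
--     # Bottom-up DP over suffix pairs (i, j) instead of A's exponential double recursion.
--     m, n = len(S1), len(S2)
--     nxt = [None] * (n + 1)          # row i+1
--     for i in range(m - 1, -1, -1):
--         cur = [None] * (n + 1)      # row i
--         for j in range(n - 1, -1, -1):
--             if S1[i] == S2[j]:
--                 cur[j] = [a if a == b else '#' for a, b in zip(S1[i:], S2[j:])]
--             else:
--                 down, right = nxt[j], cur[j + 1]
--                 if down is None:
--                     cur[j] = right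
--                 elif right is None:
--                     cur[j] = down
--                 else:
--                     cur[j] = max(right, down)
--         nxt = cur
--     if nxt[0] is None:
--         raise IndexError('strings share no common character')
--     return nxt[0]
-- ===== Notes on version B (the rewrite author's own statement) =====
-- stated objective: alternative
-- what changed: replaces A's exponential double recursion over suffix pairs with a bottom-up two-row dynamic program over (i,j) suffix offsets; worst-case exponential work becomes polynomial, but B always fills the whole table, so it is slower on inputs A resolves immediately
import Mathlib
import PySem

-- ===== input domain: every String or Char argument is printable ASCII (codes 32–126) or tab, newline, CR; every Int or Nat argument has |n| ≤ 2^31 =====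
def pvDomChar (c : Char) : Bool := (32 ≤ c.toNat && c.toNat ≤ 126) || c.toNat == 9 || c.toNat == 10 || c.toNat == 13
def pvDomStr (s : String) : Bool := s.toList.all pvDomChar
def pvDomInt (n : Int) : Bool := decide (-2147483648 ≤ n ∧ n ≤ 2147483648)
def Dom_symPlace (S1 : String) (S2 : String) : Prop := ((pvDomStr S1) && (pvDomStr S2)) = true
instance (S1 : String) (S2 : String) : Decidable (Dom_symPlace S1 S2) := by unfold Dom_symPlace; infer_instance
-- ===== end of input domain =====

-- B replaces A's exponential double recursion over suffix pairs with a bottom-up two-row DP over suffix offsets.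
-- Pre_ excludes exactly the inputs where A raises IndexError (some match-avoiding walk exhausts a string).


-- Python's max(o1, o2) on lists of strings: lexicographic, returns the first argument on ties.
def pyListLt : List String → List String → Bool
  | _, [] => false
  | [], _ :: _ => true
  | a :: as, b :: bs => if a < b then true else if b < a then false else pyListLt as bs

def pyListMax (o1 o2 : List String) : List String := if pyListLt o1 o2 then o2 else o1

-- ===== PORT A =====
-- match(ele1, ele2)
def matchEle (e1 e2 : Char) : String := if e1 = e2 then String.ofList [e1] else "#"

-- the recursion of A on the two suffixes; [] where Python raises IndexError (excluded by Pre_)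
def symAux : List Char → List Char → List String
  | a :: t1, b :: t2 =>
      if a = b then List.zipWith matchEle (a :: t1) (b :: t2)
      else
        let option1 := symAux (a :: t1) t2
        let option2 := symAux t1 (b :: t2)
        pyListMax option1 option2
  | _, _ => []
termination_by s1 s2 => s1.length + s2.length
decreasing_by all_goals (simp; try omega)

def symPlace (S1 : String) (S2 : String) : List String := symAux S1.toList S2.toList

-- ===== PORT B =====
-- [a if a == b else '#' for a, b in zip(S1[i:], S2[j:])]
def mapMatchB (s1 s2 : List Char) : List String :=
  List.zipWith (fun a b => if a = b then String.ofList [a] else "#") s1 s2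

-- the None-skipping combination of the two neighbour cells (down = nxt[j], right = cur[j+1])
def combineB (down right : Option (List String)) : Option (List String) :=
  match down with
  | none => right
  | some dv => match right with
    | none => some dv
    | some rv => some (pyListMax rv dv)

-- cur row for S1-suffix s1 (nonempty), built right-to-left over the S2-suffix; next = row below
def rowForB (s1 : List Char) : List Char → List (Option (List String)) → List (Option (List String))
  | [], _ => [none]
  | b :: t2, next =>
      let rest := rowForB s1 t2 next.tail
      let cell := if s1.headD ' ' = b then some (mapMatchB s1 (b :: t2))
                  else combineB (next.headD none) (rest.headD none)
      cell :: rest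

-- the i-loop: row for suffix s1 of S1 over S2
def tableB : List Char → List Char → List (Option (List String))
  | [], s2 => List.replicate (s2.length + 1) none
  | a :: t1, s2 => rowForB (a :: t1) s2 (tableB t1 s2)

def symPlace_alt (S1 : String) (S2 : String) : List String :=
  match (tableB S1.toList S2.toList).headD none with
  | some v => v
  | none => []   -- Python B raises IndexError here (excluded by Pre_)

-- ===== PRECONDITION & SPEC =====
-- all Bool lists of length k: the walks through the pair of strings (true = step in S1, false = step in S2)
def boolPaths : Nat → List (List Bool)
  | 0 => [[]]
  | k + 1 => (boolPaths k).flatMap (fun l => [true :: l, false :: l])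

-- Pre_ holds exactly when Python A returns normally: every walk through the two strings
-- reaches, after some number k of steps, a pair of in-range offsets with equal characters
-- (A raises IndexError precisely when some walk exhausts one string before such a position).
def Pre_symPlace (S1 : String) (S2 : String) : Prop :=
  ∀ ds ∈ boolPaths (S1.toList.length + S2.toList.length),
    ∃ k ∈ List.range (S1.toList.length + S2.toList.length + 1),
      (ds.take k).count true < S1.toList.length ∧
      (ds.take k).count false < S2.toList.length ∧
      S1.toList[(ds.take k).count true]? = S2.toList[(ds.take k).count false]?
instance (S1 : String) (S2 : String) : Decidable (Pre_symPlace S1 S2) := by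
  unfold Pre_symPlace; infer_instance

def pvWitness_symPlace : String × String := ("ab", "ac")

def Spec_symPlace (S1 : String) (S2 : String) (out : List String) : Prop := out = symPlace_alt S1 S2
instance (S1 : String) (S2 : String) (out : List String) : Decidable (Spec_symPlace S1 S2 out) := by unfold Spec_symPlace; infer_instance

-- ===== CLAIM (what is proved, stated in full; the proofs are below) =====
def Claim_equal_symPlace : Prop := ∀ (S1 : String) (S2 : String), Dom_symPlace S1 S2 → Pre_symPlace S1 S2 → Spec_symPlace S1 S2 (symPlace S1 S2)

-- ===== LEMMAS AND PROOFS =====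

-- proof-side characterisation of "A returns normally" on the suffix pair
def okA : List Char → List Char → Bool
  | a :: t1, b :: t2 => if a = b then true else okA (a :: t1) t2 && okA t1 (b :: t2)
  | _, _ => false
termination_by s1 s2 => s1.length + s2.length
decreasing_by all_goals (simp; try omega)

-- proof-side tracer of one walk: true when the walk exhausts a string before meeting a match
def pathEscapes : List Char → List Char → List Bool → Bool
  | a :: t1, b :: t2, ds =>
      if a = b then false
      else match ds with
        | [] => false
        | d :: ds' => if d then pathEscapes t1 (b :: t2) ds' else pathEscapes (a :: t1) t2 ds'
  | _, _, _ => true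

theorem mem_boolPaths {k : Nat} {l : List Bool} : l ∈ boolPaths k ↔ l.length = k := by
  induction k generalizing l with
  | zero => simp [boolPaths, List.length_eq_zero_iff]
  | succ k ih =>
    simp only [boolPaths, List.mem_flatMap, List.mem_cons]
    constructor
    · rintro ⟨l', hl', h | h | h⟩ <;> simp_all [ih.mp hl']
    · intro h
      cases l with
      | nil => simp at h
      | cons d t => exact ⟨t, ih.mpr (by simpa using h), by cases d <;> simp⟩

-- on an escaping walk no prefix of the walk sits at a pair of in-range offsets with equal characters
theorem escape_no_match : ∀ (ds : List Bool) (s1 s2 : List Char),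
    pathEscapes s1 s2 ds = true → ∀ k : Nat,
      ¬((ds.take k).count true < s1.length ∧ (ds.take k).count false < s2.length ∧
        s1[(ds.take k).count true]? = s2[(ds.take k).count false]?) := by
  intro ds
  induction ds with
  | nil =>
    intro s1 s2 hesc k
    match s1, s2 with
    | a :: t1, b :: t2 => simp [pathEscapes] at hesc
    | [], _ => rintro ⟨hi, _, _⟩; simp at hi
    | _ :: _, [] => rintro ⟨_, hj, _⟩; simp at hj
  | cons d ds ih =>
    intro s1 s2 hesc k
    match s1, s2 with
    | [], _ => rintro ⟨hi, _, _⟩; simp at hi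
    | _ :: _, [] => rintro ⟨_, hj, _⟩; simp at hj
    | a :: t1, b :: t2 =>
      by_cases hab : a = b
      · simp [pathEscapes, hab] at hesc
      · rw [pathEscapes] at hesc
        simp only [if_neg hab] at hesc
        cases k with
        | zero => rintro ⟨_, _, hm⟩; simp at hm; exact hab hm
        | succ k =>
          cases d with
          | true =>
            simp only [if_true] at hesc
            rintro ⟨hi, hj, hm⟩
            simp only [List.take_succ_cons, List.count_cons, List.length_cons] at hi hj hm
            simp at hi hj hm
            exact ih t1 (b :: t2) hesc k ⟨by omega, by simp; omega, hm⟩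
          | false =>
            simp only [Bool.false_eq_true, if_false] at hesc
            rintro ⟨hi, hj, hm⟩
            simp only [List.take_succ_cons, List.count_cons, List.length_cons] at hi hj hm
            simp at hi hj hm
            exact ih (a :: t1) t2 hesc k ⟨by simp; omega, by omega, hm⟩

-- if A's recursion raises somewhere below (s1, s2), some walk of full length escapes
theorem not_ok_escape : ∀ (s1 s2 : List Char), okA s1 s2 = false →
    ∃ ds, ds.length = s1.length + s2.length ∧ pathEscapes s1 s2 ds = true := by
  intro s1 s2
  fun_induction okA s1 s2 with
  | case1 t1 b t2 => intro h; simp at h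
  | case2 a t1 b t2 hab ih2 ih1 =>
    intro h
    rcases Bool.and_eq_false_iff.mp h with h1 | h1
    · obtain ⟨ds, hlen, hesc⟩ := ih2 h1
      exact ⟨false :: ds, by simp [hlen]; omega, by simpa [pathEscapes, hab] using hesc⟩
    · obtain ⟨ds, hlen, hesc⟩ := ih1 h1
      exact ⟨true :: ds, by simp [hlen]; omega, by simpa [pathEscapes, hab] using hesc⟩
  | case3 s1 s2 h1 =>
    intro _
    refine ⟨List.replicate (s1.length + s2.length) true, by simp, ?_⟩
    match s1, s2 with
    | [], s2 => simp [pathEscapes]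
    | a :: t1, [] => simp [pathEscapes]
    | a :: t1, b :: t2 => exact (h1 a t1 b t2 rfl rfl).elim

theorem tail_tableB : ∀ (t1 : List Char) (b : Char) (t2 : List Char),
    (tableB t1 (b :: t2)).tail = tableB t1 t2 := by
  intro t1
  induction t1 with
  | nil => intro b t2; simp [tableB, List.replicate_succ]
  | cons x t ih =>
    intro b t2
    show (rowForB (x :: t) (b :: t2) (tableB t (b :: t2))).tail = _
    rw [rowForB]
    simp only [List.tail_cons]
    rw [ih b t2]
    rfl

theorem mapMatchB_eq (s1 s2 : List Char) : mapMatchB s1 s2 = List.zipWith matchEle s1 s2 := rfl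

theorem cell_some : ∀ (s1 s2 : List Char), okA s1 s2 = true →
    (tableB s1 s2).headD none = some (symAux s1 s2) := by
  intro s1 s2
  fun_induction okA s1 s2 with
  | case1 t1 b t2 =>
    intro _
    show (rowForB (b :: t1) (b :: t2) (tableB t1 (b :: t2))).headD none = _
    rw [rowForB, symAux]
    simp [mapMatchB_eq]
  | case2 a t1 b t2 hab ih2 ih1 =>
    intro h
    simp only [Bool.and_eq_true] at h
    obtain ⟨h1, h2⟩ := h
    show (rowForB (a :: t1) (b :: t2) (tableB t1 (b :: t2))).headD none = _
    rw [rowForB, symAux]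
    simp only [List.headD_cons, if_neg hab]
    have hrest : rowForB (a :: t1) t2 (tableB t1 (b :: t2)).tail = tableB (a :: t1) t2 := by
      rw [tail_tableB]; rfl
    rw [hrest, ih2 h1, ih1 h2]
    rfl
  | case3 s1 s2 h1 =>
    intro h; simp at h

-- ===== VERDICT (by name: the statement is the Claim_ definition above) =====
theorem symPlace_spec : Claim_equal_symPlace := by
  intro S1 S2 _ hpre
  unfold Spec_symPlace symPlace symPlace_alt
  have hok : okA S1.toList S2.toList = true := by
    cases hcase : okA S1.toList S2.toList with
    | true => rfl
    | false =>
      obtain ⟨ds, hlen, hesc⟩ := not_ok_escape _ _ hcase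
      obtain ⟨k, _, hmatch⟩ := hpre ds (mem_boolPaths.mpr hlen)
      exact absurd hmatch (escape_no_match ds _ _ hesc k)
  rw [cell_some _ _ hok]
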